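-- pv_equiv track=rewrite | github.com/Mickdownunder/kitchen-online | scripts/convert-backup-to-inserts.py | unescape_copy_field
-- ===== SOURCE A (Python) =====
-- def unescape_copy_field(field: str) -> str:
--     r"""Unescape PostgreSQL COPY format: \\ -> \, \n -> newline, \t -> tab."""
--     if not field or field == "\\N":
--         return field
--     result = []
--     i = 0
--     while i < len(field):
--         if field[i] == "\\" and i + 1 < len(field):
--             n = field[i + 1]
--             if n == "\\":
--                 result.append("\\")
--             elif n == "n":
--                 result.append("\n")
--             elif n == "t":
--                 result.append("\t")
--             elif n == "r":
--                 result.append("\r")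
--             else:
--                 result.append(field[i])
--                 result.append(n)
--             i += 2
--         else:
--             result.append(field[i])
--             i += 1
--     return "".join(result)
-- ===== SOURCE B (Python) =====
-- MAP = {'\\': '\\', 'n': '\n', 't': '\t', 'r': '\r'}
--
-- def unescape_copy_field(field: str) -> str:
--     r"""Unescape PostgreSQL COPY format: \\ -> \, \n -> newline, \t -> tab."""
--     if not field or field == "\\N":
--         return field
--     parts = field.split('\\')
--     out = [parts[0]]
--     i = 1
--     while i < len(parts):
--         p = parts[i]
--         if p:
--             out.append(MAP.get(p[0], '\\' + p[0]) + p[1:])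
--             i += 1
--         elif i == len(parts) - 1:
--             out.append('\\')          # trailing lone backslash
--             i += 1
--         else:
--             out.append('\\' + parts[i + 1])   # doubled backslash
--             i += 2
--     return ''.join(out)
-- ===== Notes on version B (the rewrite author's own statement) =====
-- stated objective: faster
-- what changed: Replaces the char-by-char index loop with its elif chain by one split on the backslash separator followed by a pass over the parts that translates only each part's first character through a dict (consuming two parts for a doubled backslash).
import Mathlib
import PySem

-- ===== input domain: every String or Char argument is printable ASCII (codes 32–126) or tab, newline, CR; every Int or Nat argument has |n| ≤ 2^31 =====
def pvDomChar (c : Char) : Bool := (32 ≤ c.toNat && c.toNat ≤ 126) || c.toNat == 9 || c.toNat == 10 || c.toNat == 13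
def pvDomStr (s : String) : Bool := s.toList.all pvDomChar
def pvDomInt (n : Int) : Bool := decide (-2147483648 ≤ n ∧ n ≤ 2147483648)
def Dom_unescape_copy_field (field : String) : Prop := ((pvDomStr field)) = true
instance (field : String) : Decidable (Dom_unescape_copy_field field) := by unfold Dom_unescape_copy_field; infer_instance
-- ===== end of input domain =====

-- B replaces A's char-by-char index loop (elif chain) by a single split on '\' plus a
-- dict translation of each part's first character; same output, measured faster (split scans in C).

-- ===== PORT A =====
-- A's while loop: index i advances by 2 on a backslash pair, by 1 otherwise; `result`
-- accumulates the pieces exactly as Python appends them.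
def uA_loop (cs : List Char) (i : Nat) (res : List Char) : List Char :=
  if h : i < cs.length then
    if h2 : cs[i] = '\\' ∧ i + 1 < cs.length then
      let n := cs[i + 1]'h2.2
      let piece : List Char :=
        if n = '\\' then ['\\']
        else if n = 'n' then ['\n']
        else if n = 't' then ['\t']
        else if n = 'r' then ['\r']
        else [cs[i], n]
      uA_loop cs (i + 2) (res ++ piece)
    else uA_loop cs (i + 1) (res ++ [cs[i]])
  else res
termination_by cs.length - i

def unescape_copy_field (field : String) : String :=
  if field = "" ∨ field = "\\N" then field
  else String.mk (uA_loop field.toList 0 [])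

-- ===== PORT B =====
-- the MAP dict of Source B (association list, first match = dict lookup)
def pvMAP : List (Char × Char) := [('\\', '\\'), ('n', '\n'), ('t', '\t'), ('r', '\r')]

-- str.split(sep) for a one-character separator, ported step for step (keeps empty parts)
def pvSplit1 (sep : Char) : List Char → List (List Char)
  | [] => [[]]
  | c :: rest =>
    let ps := pvSplit1 sep rest
    if c = sep then [] :: ps
    else
      match ps with
      | p :: ps' => (c :: p) :: ps'
      | [] => [[c]]   -- unreachable: pvSplit1 never returns []

-- Source B's while loop over parts[1:]: a nonempty part translates its first char through
-- MAP; an empty part is a doubled backslash (consume the next part raw) or, at the end,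
-- a trailing lone backslash.
def uB_parts : List (List Char) → List Char
  | [] => []
  | p :: rest =>
    match p with
    | c :: cs =>
      (match List.lookup c pvMAP with
       | some r => [r]
       | none => ['\\', c]) ++ cs ++ uB_parts rest
    | [] =>
      match rest with
      | [] => ['\\']
      | q :: rest' => '\\' :: (q ++ uB_parts rest')

def unescape_copy_field_alt (field : String) : String :=
  if field = "" ∨ field = "\\N" then field
  else
    match pvSplit1 '\\' field.toList with
    | p :: rest => String.mk (p ++ uB_parts rest)
    | [] => ""   -- unreachable

-- ===== PRECONDITION & SPEC =====
def Spec_unescape_copy_field (field : String) (out : String) : Prop := out = unescape_copy_field_alt field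
instance (field : String) (out : String) : Decidable (Spec_unescape_copy_field field out) := by unfold Spec_unescape_copy_field; infer_instance

-- ===== CLAIM (what is proved, stated in full; the proofs are below) =====
def Claim_equal_unescape_copy_field : Prop := ∀ (field : String), Dom_unescape_copy_field field → Spec_unescape_copy_field field (unescape_copy_field field)

-- ===== LEMMAS AND PROOFS =====

-- direct pair-at-a-time recursion: the common middle ground between the two ports
def uC : List Char → List Char
  | [] => []
  | c :: rest =>
    if c = '\\' then
      match rest with
      | [] => ['\\']
      | d :: rest' =>
        (if d = '\\' then ['\\']
         else if d = 'n' then ['\n']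
         else if d = 't' then ['\t']
         else if d = 'r' then ['\r']
         else ['\\', d]) ++ uC rest'
    else c :: uC rest

lemma pvSplit1_ne_nil (sep : Char) (l : List Char) : pvSplit1 sep l ≠ [] := by
  induction l with
  | nil => simp [pvSplit1]
  | cons c rest ih =>
    simp only [pvSplit1]
    split_ifs
    · simp
    · cases h : pvSplit1 sep rest with
      | nil => exact absurd h ih
      | cons p ps' => simp

-- A's loop equals uC on the remaining suffix
lemma uA_loop_eq (cs : List Char) (i : Nat) (res : List Char) :
    uA_loop cs i res = res ++ uC (cs.drop i) := by
  fun_induction uA_loop cs i res with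
  | case1 i res h h2 n piece ih =>
    rw [ih]
    rw [List.drop_eq_getElem_cons h, List.drop_eq_getElem_cons h2.2]
    simp only [uC, h2.1, if_true, n, piece]
    split_ifs <;> simp
  | case2 i res h h2 ih =>
    rw [ih]
    simp only [not_and, not_lt] at h2
    rw [show List.drop i cs = cs[i] :: List.drop (i + 1) cs from List.drop_eq_getElem_cons h]
    by_cases hb : cs[i] = '\\'
    · have hnil : List.drop (i + 1) cs = [] := List.drop_eq_nil_of_le (h2 hb)
      rw [hnil]
      simp [uC, hb]
    · rcases hdrop : List.drop (i + 1) cs with _ | ⟨d, ts⟩ <;> simp [uC, hb]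
  | case3 i res h =>
    have : cs.drop i = [] := List.drop_eq_nil_of_le (le_of_not_gt h)
    simp [this, uC]

-- uC equals the split-based recursion
lemma uC_eq_split (cs : List Char) :
    uC cs = (pvSplit1 '\\' cs).headI ++ uB_parts (pvSplit1 '\\' cs).tail := by
  fun_induction uC cs with
  | case1 => simp [pvSplit1, uB_parts]
  | case2 =>
    -- c = '\\', rest = []
    simp [pvSplit1, uB_parts]
  | case3 d rest' ih =>
    -- c = '\\', rest = d :: rest'
    by_cases hd : d = '\\'
    · subst hd
      cases h : pvSplit1 '\\' rest' with
      | nil => exact absurd h (pvSplit1_ne_nil _ _)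
      | cons p ps' =>
        rw [h] at ih
        simp only [List.headI, List.tail] at ih
        have e1 : pvSplit1 '\\' ('\\' :: '\\' :: rest') = [] :: [] :: p :: ps' := by
          simp [pvSplit1, h]
        rw [e1]
        simp only [List.headI, List.tail, uB_parts]
        rw [ih]
        simp
    · cases h : pvSplit1 '\\' rest' with
      | nil => exact absurd h (pvSplit1_ne_nil _ _)
      | cons p ps' =>
        rw [h] at ih
        simp only [List.headI, List.tail] at ih
        have e1 : pvSplit1 '\\' ('\\' :: d :: rest') = [] :: (d :: p) :: ps' := by
          simp [pvSplit1, h, hd]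
        rw [e1]
        simp only [List.headI, List.tail, uB_parts, List.lookup, pvMAP]
        rw [ih]
        by_cases h1 : d = 'n'
        · subst h1; simp
        · by_cases h2 : d = 't'
          · subst h2; simp
          · by_cases h3 : d = 'r'
            · subst h3; simp
            · simp [hd, h1, h2, h3, beq_eq_false_iff_ne.mpr hd, beq_eq_false_iff_ne.mpr h1,
                    beq_eq_false_iff_ne.mpr h2, beq_eq_false_iff_ne.mpr h3]
  | case4 c rest hb ih =>
    cases h : pvSplit1 '\\' rest with
    | nil => exact absurd h (pvSplit1_ne_nil _ _)
    | cons p ps' =>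
      rw [h] at ih
      simp only [List.headI, List.tail] at ih
      have e1 : pvSplit1 '\\' (c :: rest) = (c :: p) :: ps' := by
        simp [pvSplit1, h, hb]
      rw [e1]
      simp only [List.headI, List.tail]
      rw [ih]
      simp

-- ===== VERDICT (by name: the statement is the Claim_ definition above) =====
theorem unescape_copy_field_spec : Claim_equal_unescape_copy_field := by
  intro field _
  unfold Spec_unescape_copy_field unescape_copy_field unescape_copy_field_alt
  split_ifs with hg
  · rfl
  · rw [uA_loop_eq, List.drop_zero, uC_eq_split]
    cases h : pvSplit1 '\\' field.toList with
    | nil => exact absurd h (pvSplit1_ne_nil _ _)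
    | cons p ps' => rfl
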